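-- pv_equiv track=rewrite | github.com/mhuang11/bball2015 | baseball.py | ToInnings
-- ===== SOURCE A (Python) =====
-- def ToInnings(outs,onbase):
--     innings = []
--     N = len(outs)
--     st = [outs[0] + onbase[0]]
--     for i in range(1,N):
--         if outs[i]=='0' and outs[i-1]!='0':
--             st.append('3---')
--             innings.append( st )
--             st = ['0---']
--         else:
--             tostring = outs[i] + onbase[i]
--             st.append(tostring)
--     # last atbats
--     st.append('3---')
--     innings.append(st)
--     return innings
-- ===== SOURCE B (Python) =====
-- def ToInnings(outs, onbase):
--     first = outs[0] + onbase[0]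
--     N = len(outs)
--     bounds = [i for i in range(1, N)
--               if outs[i] == '0' and outs[i - 1] != '0']
--     innings = []
--     for b, e in zip([0] + bounds, bounds + [N]):
--         head = first if b == 0 else '0---'
--         innings.append([head]
--                        + [outs[j] + onbase[j] for j in range(b + 1, e)]
--                        + ['3---'])
--     return innings
-- ===== Notes on version B (the rewrite author's own statement) =====
-- stated objective: alternative
-- what changed: Replaces A's single stateful loop (mutable current-inning list reset at each out-transition) by a two-phase decomposition: one comprehension collects the boundary indices, then each inning is built independently by slicing between consecutive boundaries.
import Mathlib
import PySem

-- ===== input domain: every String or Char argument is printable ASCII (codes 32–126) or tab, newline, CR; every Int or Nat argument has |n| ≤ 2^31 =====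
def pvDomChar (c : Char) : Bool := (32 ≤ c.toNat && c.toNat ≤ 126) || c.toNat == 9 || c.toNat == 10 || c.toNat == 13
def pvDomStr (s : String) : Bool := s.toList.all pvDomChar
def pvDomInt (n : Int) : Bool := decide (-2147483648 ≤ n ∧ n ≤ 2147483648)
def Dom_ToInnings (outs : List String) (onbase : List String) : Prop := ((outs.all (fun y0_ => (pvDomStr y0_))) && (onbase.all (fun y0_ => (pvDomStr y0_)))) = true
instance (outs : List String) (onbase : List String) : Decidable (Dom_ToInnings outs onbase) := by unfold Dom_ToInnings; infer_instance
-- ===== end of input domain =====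

-- B re-decomposes A's one stateful grouping loop into boundary-index collection followed by
-- per-segment slicing ("alternative" objective, same linear cost); return values agree wherever A returns.

-- ===== PORT A =====
-- the loop body of A (state = (innings so far, current inning st)); indices are in range under Pre_
def pvStepA (outs : List String) (onbase : List String)
    (acc : List (List String) × List String) (i : Nat) : List (List String) × List String :=
  if outs.getD i "" = "0" ∧ outs.getD (i - 1) "" ≠ "0" then
    (acc.1 ++ [acc.2 ++ ["3---"]], ["0---"])
  else
    (acc.1, acc.2 ++ [outs.getD i "" ++ onbase.getD i ""])

def ToInnings (outs : List String) (onbase : List String) : List (List String) :=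
  let N := outs.length
  let r := (List.range' 1 (N - 1)).foldl (pvStepA outs onbase)
             ([], [outs.getD 0 "" ++ onbase.getD 0 ""])
  r.1 ++ [r.2 ++ ["3---"]]

-- ===== PORT B =====
-- boundary test of B's comprehension
def pvBndB (outs : List String) (i : Nat) : Bool :=
  decide (outs.getD i "" = "0" ∧ outs.getD (i - 1) "" ≠ "0")

-- one inning built from a boundary pair (b, e)
def pvSegB (outs : List String) (onbase : List String) (first : String)
    (be : Nat × Nat) : List String :=
  ((if be.1 = 0 then first else "0---") ::
    (List.range' (be.1 + 1) (be.2 - (be.1 + 1))).map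
      (fun j => outs.getD j "" ++ onbase.getD j "")) ++ ["3---"]

def ToInnings_alt (outs : List String) (onbase : List String) : List (List String) :=
  let first := outs.getD 0 "" ++ onbase.getD 0 ""
  let N := outs.length
  let bounds := (List.range' 1 (N - 1)).filter (pvBndB outs)
  (List.zip (0 :: bounds) (bounds ++ [N])).map (pvSegB outs onbase first)

-- ===== PRECONDITION & SPEC =====
-- Pre_ = exactly the inputs on which Python A returns: it raises IndexError on empty outs/onbase
-- and whenever a non-boundary index i ≥ len(onbase) is reached (onbase[i] is only read off boundaries).
def Pre_ToInnings (outs : List String) (onbase : List String) : Prop :=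
  outs ≠ [] ∧ onbase ≠ [] ∧
  ∀ i, i < outs.length → 1 ≤ i → onbase.length ≤ i →
    (outs.getD i "" = "0" ∧ outs.getD (i - 1) "" ≠ "0")
instance (outs : List String) (onbase : List String) : Decidable (Pre_ToInnings outs onbase) := by
  unfold Pre_ToInnings; infer_instance

def pvWitness_ToInnings : List String × List String :=
  (["0", "1", "0", "2"], ["---", "1--", "---", "12-"])

def Spec_ToInnings (outs : List String) (onbase : List String) (out : List (List String)) : Prop := out = ToInnings_alt outs onbase
instance (outs : List String) (onbase : List String) (out : List (List String)) : Decidable (Spec_ToInnings outs onbase out) := by unfold Spec_ToInnings; infer_instance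

-- ===== CLAIM (what is proved, stated in full; the proofs are below) =====
def Claim_equal_ToInnings : Prop := ∀ (outs : List String) (onbase : List String), Dom_ToInnings outs onbase → Pre_ToInnings outs onbase → Spec_ToInnings outs onbase (ToInnings outs onbase)

-- ===== LEMMAS AND PROOFS =====

-- reference grouping recursion both ports are reduced to
def pvGo (p : Nat → Bool) (g : Nat → String) : List Nat → List String → List (List String)
  | [], cur => [cur ++ ["3---"]]
  | i :: is, cur =>
    if p i then (cur ++ ["3---"]) :: pvGo p g is ["0---"]
    else pvGo p g is (cur ++ [g i])

-- A's fold equals the reference recursion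
theorem foldA_go (outs onbase : List String) :
    ∀ (L : List Nat) (acc : List (List String)) (cur : List String),
      (L.foldl (pvStepA outs onbase) (acc, cur)).1 ++
        [(L.foldl (pvStepA outs onbase) (acc, cur)).2 ++ ["3---"]]
      = acc ++ pvGo (pvBndB outs) (fun j => outs.getD j "" ++ onbase.getD j "") L cur := by
  intro L
  induction L with
  | nil => intro acc cur; simp [pvGo]
  | cons i is ih =>
    intro acc cur
    by_cases h : outs.getD i "" = "0" ∧ outs.getD (i - 1) "" ≠ "0"
    · have hb : pvBndB outs i = true := decide_eq_true h
      simp only [List.foldl_cons, pvStepA, pvGo]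
      rw [if_pos h, if_pos hb, ih]
      simp
    · have hb : ¬ pvBndB outs i = true := fun hc => h (of_decide_eq_true hc)
      simp only [List.foldl_cons, pvStepA, pvGo]
      rw [if_neg h, if_neg hb, ih]

-- B's zip-of-boundaries construction equals the reference recursion
theorem go_segs (outs onbase : List String) (first : String) :
    ∀ (m s b : Nat), b < s →
      pvGo (pvBndB outs) (fun j => outs.getD j "" ++ onbase.getD j "")
        (List.range' s m)
        ((if b = 0 then first else "0---") ::
          (List.range' (b + 1) (s - (b + 1))).map
            (fun j => outs.getD j "" ++ onbase.getD j ""))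
      = (List.zip (b :: (List.range' s m).filter (pvBndB outs))
          ((List.range' s m).filter (pvBndB outs) ++ [s + m])).map
          (pvSegB outs onbase first) := by
  intro m
  induction m with
  | zero =>
    intro s b hb
    simp [pvGo, pvSegB]
  | succ m ih =>
    intro s b hb
    have hs : 0 < s := Nat.lt_of_le_of_lt (Nat.zero_le b) hb
    rw [List.range'_succ]
    by_cases h : pvBndB outs s = true
    · have hz : ["0---"] =
          ((if s = 0 then first else "0---") ::
            (List.range' (s + 1) ((s + 1) - (s + 1))).map
              (fun j => outs.getD j "" ++ onbase.getD j "")) := by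
        simp [Nat.ne_of_gt hs]
      have := ih (s + 1) s (Nat.lt_succ_self s)
      simp only [pvGo, h, if_true, List.filter_cons]
      rw [hz, this]
      have harith : s + (m + 1) = (s + 1) + m := by omega
      simp [pvSegB, harith]
    · have hcur :
          (((if b = 0 then first else "0---") ::
            (List.range' (b + 1) (s - (b + 1))).map
              (fun j => outs.getD j "" ++ onbase.getD j "")) ++
              [outs.getD s "" ++ onbase.getD s ""])
          = ((if b = 0 then first else "0---") ::
            (List.range' (b + 1) ((s + 1) - (b + 1))).map
              (fun j => outs.getD j "" ++ onbase.getD j "")) := by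
        have h1 : (s + 1) - (b + 1) = (s - (b + 1)) + 1 := by omega
        have h2 : b + 1 + 1 * (s - (b + 1)) = s := by omega
        rw [h1, List.range'_concat, h2, List.map_append]
        simp
      have := ih (s + 1) b (Nat.lt_succ_of_lt hb)
      simp only [pvGo, h, List.filter_cons]
      rw [hcur, this]
      have harith : s + (m + 1) = (s + 1) + m := by omega
      simp [harith]

-- ===== VERDICT (by name: the statement is the Claim_ definition above) =====
theorem ToInnings_spec : Claim_equal_ToInnings := by
  intro outs onbase _ hpre
  unfold Spec_ToInnings ToInnings ToInnings_alt
  have hN : 1 ≤ outs.length := by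
    cases outs with
    | nil => exact absurd rfl hpre.1
    | cons a l => simp
  have hfold := foldA_go outs onbase (List.range' 1 (outs.length - 1)) []
    [outs.getD 0 "" ++ onbase.getD 0 ""]
  have hsegs := go_segs outs onbase (outs.getD 0 "" ++ onbase.getD 0 "") (outs.length - 1) 1 0
    (Nat.lt_succ_self 0)
  have harith : 1 + (outs.length - 1) = outs.length := by omega
  simp only [harith] at hsegs
  simp only [List.nil_append] at hfold
  rw [hfold]
  rw [show (List.range' (0 + 1) (1 - (0 + 1))).map
      (fun j => outs.getD j "" ++ onbase.getD j "") = [] by simp] at hsegs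
  simpa using hsegs
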